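-- pv_equiv track=rewrite | github.com/Gryfit/Python-AGH | lab3/z1.py | listelements
-- ===== SOURCE A (Python) =====
-- def listelements(dane):
--     r = []
--     tmp = ""
--     i =0
--     for el in dane:
--         if(el != "(" and el != ")" and el != "|"):
--             tmp += el
--         if(el == ")"):
--             r.append(tmp)
--             tmp = ""
--     return r
-- ===== SOURCE B (Python) =====
-- def listelements(dane):
--     res = []
--     while ")" in dane:
--         head, _, dane = dane.partition(")")
--         res.append("".join(c for c in head if c not in "(|"))
--     return res
-- ===== Notes on version B (the rewrite author's own statement) =====
-- stated objective: simpler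
-- what changed: Replaces A's char-by-char accumulate-and-flush state machine with a partition-driven loop that repeatedly cuts the string at the next closing parenthesis and filters the opening-parenthesis and bar characters out of the head; a timing run measured B faster (C-level str.partition/join vs a Python char loop).
import Mathlib
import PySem

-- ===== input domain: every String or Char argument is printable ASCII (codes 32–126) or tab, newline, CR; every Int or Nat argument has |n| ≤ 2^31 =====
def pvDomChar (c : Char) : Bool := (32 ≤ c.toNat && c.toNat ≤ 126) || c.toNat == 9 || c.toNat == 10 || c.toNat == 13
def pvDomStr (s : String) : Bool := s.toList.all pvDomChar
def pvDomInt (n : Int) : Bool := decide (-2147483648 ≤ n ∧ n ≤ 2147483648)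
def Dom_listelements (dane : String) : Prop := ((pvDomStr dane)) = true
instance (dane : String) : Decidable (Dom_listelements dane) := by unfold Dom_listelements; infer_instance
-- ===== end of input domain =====

-- B replaces A's char-by-char accumulate-and-flush state machine by a partition-driven
-- loop: repeatedly cut the string at the next ')', filter '(' and '|' out of the head.
-- Objective: simpler; a timing run measured B faster (C-level partition/join vs a Python char loop).

-- ===== PORT A =====
-- the loop body of A: filter the char into tmp, flush tmp into r on ')'
def pvStepA (acc : List String × String) (el : Char) : List String × String :=
  let acc := if el ≠ '(' ∧ el ≠ ')' ∧ el ≠ '|' then (acc.1, acc.2.push el) else acc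
  if el = ')' then (acc.1 ++ [acc.2], "") else acc

def listelements (dane : String) : List String :=
  (dane.toList.foldl pvStepA ([], "")).1

-- ===== PORT B =====
-- helper for termination of pvGoB: if ')' occurs, dropWhile leaves a nonempty list
theorem pvDrop_lt (cs : List Char) (h : ')' ∈ cs) :
    (cs.dropWhile (fun c => c ≠ ')')).tail.length < cs.length := by
  have hne : cs.dropWhile (fun c => c ≠ ')') ≠ [] := by
    intro he
    have := (List.dropWhile_eq_nil_iff).1 he _ h
    simp at this
  have hle : (cs.dropWhile (fun c => c ≠ ')')).length ≤ cs.length :=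
    List.length_dropWhile_le _ _
  cases hd : cs.dropWhile (fun c => c ≠ ')') with
  | nil => exact absurd hd hne
  | cons x xs =>
    have := hd ▸ hle
    simp at this ⊢
    omega

-- '.join(c for c in head if c not in "(|")' — the genexp filter, ported step for step
def pvStripB (cs : List Char) : List Char := cs.filter (fun c => !(c = '(' ∨ c = '|'))

-- the while loop of Source B, as recursion on the remaining string;
-- '")" in dane' is membership of the single char ')'; partition(")") is the
-- (takeWhile, dropWhile) cut at the first ')'.  (str.partition has no PySem primitive;
-- this hand port is exact for a single-character separator that is present.)
def pvGoB (cs : List Char) : List String :=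
  if h : ')' ∈ cs then
    String.ofList (pvStripB (cs.takeWhile (fun c => c ≠ ')'))) ::
      pvGoB ((cs.dropWhile (fun c => c ≠ ')')).tail)
  else []
termination_by cs.length
decreasing_by exact pvDrop_lt cs h

def listelements_alt (dane : String) : List String := pvGoB dane.toList

-- ===== PRECONDITION & SPEC =====
def Spec_listelements (dane : String) (out : List String) : Prop := out = listelements_alt dane
instance (dane : String) (out : List String) : Decidable (Spec_listelements dane out) := by unfold Spec_listelements; infer_instance

-- ===== CLAIM (what is proved, stated in full; the proofs are below) =====
def Claim_equal_listelements : Prop := ∀ (dane : String), Dom_listelements dane → Spec_listelements dane (listelements dane)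

-- ===== LEMMAS AND PROOFS =====

theorem pvPush_ofList (t : List Char) (c : Char) :
    (String.ofList t).push c = String.ofList (t ++ [c]) := by
  apply String.toList_inj.mp; simp

-- B's result with a pending (already filtered) prefix t glued onto the first segment
def pvGoT (t : List Char) (cs : List Char) : List String :=
  if ')' ∈ cs then
    String.ofList (t ++ pvStripB (cs.takeWhile (fun c => c ≠ ')'))) ::
      pvGoB ((cs.dropWhile (fun c => c ≠ ')')).tail)
  else []

theorem pvGoT_nil (cs : List Char) : pvGoT [] cs = pvGoB cs := by
  rw [pvGoT]
  conv_rhs => rw [pvGoB]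
  split <;> simp

-- the loop invariant of A's fold: the accumulator pair (r, t) contributes r ++ pvGoT t cs
theorem pvLoop (cs : List Char) (r : List String) (t : List Char) :
    (cs.foldl pvStepA (r, String.ofList t)).1 = r ++ pvGoT t cs := by
  induction cs generalizing r t with
  | nil => simp [pvGoT]
  | cons c cs ih =>
    by_cases hc : c = ')'
    · subst hc
      have hstep : pvStepA (r, String.ofList t) ')' = (r ++ [String.ofList t], String.ofList []) := by
        simp [pvStepA]
      simp only [List.foldl_cons, hstep, ih, pvGoT_nil]
      rw [pvGoT]
      simp [pvStripB, List.takeWhile, List.dropWhile]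
    · have htw : (c :: cs).takeWhile (fun x => x ≠ ')') = c :: cs.takeWhile (fun x => x ≠ ')') := by
        simp [List.takeWhile, hc]
      have hdw : (c :: cs).dropWhile (fun x => x ≠ ')') = cs.dropWhile (fun x => x ≠ ')') := by
        simp [List.dropWhile, hc]
      have hmem : (')' ∈ c :: cs) ↔ (')' ∈ cs) := by
        simp; intro h'; exact absurd h'.symm hc
      by_cases hs : c = '(' ∨ c = '|'
      · have hstep : pvStepA (r, String.ofList t) c = (r, String.ofList t) := by
          rcases hs with h | h <;> simp [pvStepA, h]
        simp only [List.foldl_cons, hstep, ih]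
        congr 1
        rw [pvGoT, pvGoT, htw, hdw]
        have hstrip : pvStripB (c :: cs.takeWhile (fun x => x ≠ ')')) =
            pvStripB (cs.takeWhile (fun x => x ≠ ')')) := by
          rcases hs with h | h <;> simp [pvStripB, h]
        rw [hstrip]
        simp only [hmem]
      · push_neg at hs
        have hstep : pvStepA (r, String.ofList t) c = (r, String.ofList (t ++ [c])) := by
          simp [pvStepA, hc, hs.1, hs.2, pvPush_ofList]
        simp only [List.foldl_cons, hstep, ih]
        congr 1
        rw [pvGoT, pvGoT, htw, hdw]
        have hstrip : pvStripB (c :: cs.takeWhile (fun x => x ≠ ')')) =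
            c :: pvStripB (cs.takeWhile (fun x => x ≠ ')')) := by
          simp [pvStripB, hs.1, hs.2]
        rw [hstrip]
        simp only [hmem]
        split <;> simp

-- ===== VERDICT (by name: the statement is the Claim_ definition above) =====
theorem listelements_spec : Claim_equal_listelements := by
  intro dane _
  show listelements dane = listelements_alt dane
  rw [listelements, listelements_alt, show ("" : String) = String.ofList [] from rfl,
    pvLoop, pvGoT_nil, List.nil_append]
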